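-- pv_equiv track=rewrite | github.com/zhinst/laboneq | laboneq/compiler/feedback_router/feedback_router.py | _register_bitshift
-- ===== SOURCE A (Python) =====
-- def _register_bitshift(
--     register: int, qa_signal: str, register_layout, force_local_alignment=False
-- ):
--     """Calculate offset and mask into register for given qa_signal
--
--     If `force_local_alignment` is true, assume that every measurement spans 2 bits,
--     i.e. how the data are laid out in the local feedback register.
--     """
--     register_bitshift = 0  # offset into the register
--     for width, signal in register_layout[register]:
--         if signal == qa_signal:
--             mask = (1 << width) - 1
--             break
--         else:
--             register_bitshift += width if not force_local_alignment else 2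
--     else:
--         raise AssertionError(f"Signal {qa_signal} not found in register {register}")
--     return register_bitshift, width, mask
-- ===== SOURCE B (Python) =====
-- def _register_bitshift(
--     register: int, qa_signal: str, register_layout, force_local_alignment=False
-- ):
--     """Calculate offset and mask into register for given qa_signal (find-then-sum)."""
--     entries = register_layout[register]
--     for idx, (width, sig) in enumerate(entries):
--         if sig == qa_signal:
--             break
--     else:
--         raise AssertionError(f"Signal {qa_signal} not found in register {register}")
--     mask = (1 << width) - 1
--     if force_local_alignment:
--         register_bitshift = 2 * idx
--     else:
--         register_bitshift = sum(w for w, _ in entries[:idx])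
--     return register_bitshift, width, mask
-- ===== Notes on version B (the rewrite author's own statement) =====
-- stated objective: alternative
-- what changed: B first locates the index of the first matching signal, then computes the offset separately (2*idx or a prefix sum over the entries before the match), instead of A's single pass that threads an offset accumulator through the search loop.
import Mathlib
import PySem

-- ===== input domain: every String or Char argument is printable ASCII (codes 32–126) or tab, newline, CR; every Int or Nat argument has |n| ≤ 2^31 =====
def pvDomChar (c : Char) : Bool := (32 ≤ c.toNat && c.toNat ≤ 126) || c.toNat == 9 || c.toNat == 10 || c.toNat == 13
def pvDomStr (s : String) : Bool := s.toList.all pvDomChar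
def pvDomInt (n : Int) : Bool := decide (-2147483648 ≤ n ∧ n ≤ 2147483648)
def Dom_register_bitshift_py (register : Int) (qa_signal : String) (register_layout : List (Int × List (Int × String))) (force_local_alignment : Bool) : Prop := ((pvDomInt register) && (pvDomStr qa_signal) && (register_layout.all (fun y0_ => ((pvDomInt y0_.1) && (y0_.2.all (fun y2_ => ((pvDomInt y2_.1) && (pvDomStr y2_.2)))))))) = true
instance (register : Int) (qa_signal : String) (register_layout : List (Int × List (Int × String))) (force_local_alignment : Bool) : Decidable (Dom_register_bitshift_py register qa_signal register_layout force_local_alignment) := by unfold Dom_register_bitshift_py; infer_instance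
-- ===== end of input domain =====

-- B replaces A's offset-accumulating search loop by find-the-index-first, then a separate
-- offset computation (2*idx, or a prefix sum over the entries before the match); same cost.

-- ===== PORT A =====
-- dict lookup register_layout[register]: first match in the association list
def pvLookup (register_layout : List (Int × List (Int × String))) (register : Int) : Option (List (Int × String)) :=
  match register_layout with
  | [] => none
  | (k, v) :: rest => if k == register then some v else pvLookup rest register

-- A's for-loop: threads the offset accumulator; on a match returns (offset, width, mask).
-- '1 << width' is ported as 2 ^ width.toNat, exact since Pre_ requires 0 ≤ width at the match.
def pvLoopA (qa_signal : String) (force_local_alignment : Bool) (acc : Int) : List (Int × String) → Option (Int × Int × Int)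
  | [] => none
  | (width, signal) :: rest =>
    if signal == qa_signal then some (acc, width, 2 ^ width.toNat - 1)
    else pvLoopA qa_signal force_local_alignment (acc + (if !force_local_alignment then width else 2)) rest

def register_bitshift_py (register : Int) (qa_signal : String) (register_layout : List (Int × List (Int × String))) (force_local_alignment : Bool) : Int × Int × Int :=
  match pvLookup register_layout register with
  | none => (0, 0, 0)  -- Python raises KeyError; excluded by Pre_
  | some entries => (pvLoopA qa_signal force_local_alignment 0 entries).getD (0, 0, 0)  -- none = AssertionError; excluded by Pre_

-- ===== PORT B =====
-- find the index and width of the first entry whose signal matches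
def pvFindIdx (qa_signal : String) : List (Int × String) → Option (Nat × Int)
  | [] => none
  | (width, signal) :: rest =>
    if signal == qa_signal then some (0, width)
    else (pvFindIdx qa_signal rest).map (fun p => (p.1 + 1, p.2))

def register_bitshift_py_alt (register : Int) (qa_signal : String) (register_layout : List (Int × List (Int × String))) (force_local_alignment : Bool) : Int × Int × Int :=
  match pvLookup register_layout register with
  | none => (0, 0, 0)  -- Python raises KeyError; excluded by Pre_
  | some entries =>
    match pvFindIdx qa_signal entries with
    | none => (0, 0, 0)  -- AssertionError; excluded by Pre_
    | some (idx, width) =>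
      let mask : Int := 2 ^ width.toNat - 1
      let register_bitshift : Int :=
        if force_local_alignment then 2 * (idx : Int)
        else ((entries.take idx).map Prod.fst).foldl (· + ·) 0
      (register_bitshift, width, mask)

-- ===== PRECONDITION & SPEC =====
-- Pre_ = Python A returns normally: the register key exists, some entry's signal matches
-- (else AssertionError), and the first matching entry's width is ≥ 0 (else '1 << width' raises).
def pvPreCheck (register : Int) (qa_signal : String) (register_layout : List (Int × List (Int × String))) : Bool :=
  match (register_layout.find? (fun e => e.1 == register)).bind (fun r => r.2.find? (fun e => e.2 == qa_signal)) with
  | none => false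
  | some e => decide (0 ≤ e.1)

def Pre_register_bitshift_py (register : Int) (qa_signal : String) (register_layout : List (Int × List (Int × String))) (force_local_alignment : Bool) : Prop :=
  pvPreCheck register qa_signal register_layout = true
instance (register : Int) (qa_signal : String) (register_layout : List (Int × List (Int × String))) (force_local_alignment : Bool) : Decidable (Pre_register_bitshift_py register qa_signal register_layout force_local_alignment) := by unfold Pre_register_bitshift_py; infer_instance

def pvWitness_register_bitshift_py : Int × String × (List (Int × List (Int × String))) × Bool :=
  (1, "a", [(0, [(2, "b")]), (1, [(3, "b"), (2, "a")])], false)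

def Spec_register_bitshift_py (register : Int) (qa_signal : String) (register_layout : List (Int × List (Int × String))) (force_local_alignment : Bool) (out : Int × Int × Int) : Prop := out = register_bitshift_py_alt register qa_signal register_layout force_local_alignment
instance (register : Int) (qa_signal : String) (register_layout : List (Int × List (Int × String))) (force_local_alignment : Bool) (out : Int × Int × Int) : Decidable (Spec_register_bitshift_py register qa_signal register_layout force_local_alignment out) := by unfold Spec_register_bitshift_py; infer_instance

-- ===== CLAIM (what is proved, stated in full; the proofs are below) =====
def Claim_equal_register_bitshift_py : Prop := ∀ (register : Int) (qa_signal : String) (register_layout : List (Int × List (Int × String))) (force_local_alignment : Bool), Dom_register_bitshift_py register qa_signal register_layout force_local_alignment → Pre_register_bitshift_py register qa_signal register_layout force_local_alignment → Spec_register_bitshift_py register qa_signal register_layout force_local_alignment (register_bitshift_py register qa_signal register_layout force_local_alignment)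

-- ===== LEMMAS AND PROOFS =====

theorem foldl_add_shift (x : Int) (l : List Int) : l.foldl (· + ·) x = x + l.foldl (· + ·) 0 := by
  induction l generalizing x with
  | nil => simp
  | cons a t ih => simp only [List.foldl_cons]; rw [ih (x + a), ih (0 + a)]; ring

-- A's loop equals B's find-then-sum, for any starting accumulator.
theorem loopA_eq_find (qa : String) (fla : Bool) (entries : List (Int × String)) :
    ∀ acc : Int, pvLoopA qa fla acc entries =
      (pvFindIdx qa entries).map (fun p =>
        (acc + (if fla then 2 * (p.1 : Int)
                else ((entries.take p.1).map Prod.fst).foldl (· + ·) 0), p.2, 2 ^ p.2.toNat - 1)) := by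
  induction entries with
  | nil => intro acc; simp [pvLoopA, pvFindIdx]
  | cons e rest ih =>
    intro acc
    obtain ⟨w, s⟩ := e
    by_cases h : (s == qa) = true
    · simp [pvLoopA, pvFindIdx, h]
    · simp only [pvLoopA, pvFindIdx, h, Bool.false_eq_true, if_false, ih]
      cases hf : pvFindIdx qa rest with
      | none => simp
      | some p =>
        obtain ⟨i, wi⟩ := p
        simp only [Option.map_some]
        cases fla with
        | false =>
          simp only [Bool.not_false, if_true, if_false, List.take_succ_cons, List.map_cons,
            List.foldl_cons, Bool.false_eq_true]
          rw [foldl_add_shift (0 + w)]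
          ring_nf
        | true =>
          simp only [Bool.not_true, if_false, if_true, Bool.false_eq_true]
          push_cast
          ring_nf

theorem register_bitshift_py_witness : Dom_register_bitshift_py (pvWitness_register_bitshift_py.1) (pvWitness_register_bitshift_py.2.1) (pvWitness_register_bitshift_py.2.2.1) (pvWitness_register_bitshift_py.2.2.2) ∧ Pre_register_bitshift_py (pvWitness_register_bitshift_py.1) (pvWitness_register_bitshift_py.2.1) (pvWitness_register_bitshift_py.2.2.1) (pvWitness_register_bitshift_py.2.2.2) := by
  decide

-- ===== VERDICT (by name: the statement is the Claim_ definition above) =====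
theorem register_bitshift_py_spec : Claim_equal_register_bitshift_py := by
  intro register qa layout fla _ _
  unfold Spec_register_bitshift_py register_bitshift_py register_bitshift_py_alt
  cases h : pvLookup layout register with
  | none => rfl
  | some entries =>
    simp only [loopA_eq_find qa fla entries 0]
    cases hf : pvFindIdx qa entries with
    | none => rfl
    | some p =>
      obtain ⟨i, w⟩ := p
      simp only [Option.map_some, Option.getD_some]
      cases fla <;> simp
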